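-- pv_equiv track=rewrite | github.com/fbrubacher/p3 | crypto_proj.py | root_bs
-- ===== SOURCE A (Python) =====
-- def root_bs(n):
--     low = 0
--     high = n
--     while low < high:
--         mid = (low+high)//2
--         if mid**3 < n:
--             low = mid+1
--         else:
--             high = mid
--     return low
-- ===== SOURCE B (Python) =====
-- def root_bs(n):
--     # Newton's integer iteration for the cube root instead of bisection.
--     if n <= 0:
--         return 0
--     x = n
--     y = (2 * x + n // (x * x)) // 3
--     while y < x:
--         x = y
--         y = (2 * x + n // (x * x)) // 3
--     # x = floor(cbrt(n)); round up to the smallest integer whose cube is >= n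
--     return x if x * x * x >= n else x + 1
-- ===== Notes on version B (the rewrite author's own statement) =====
-- stated objective: alternative
-- what changed: Replaces the low/high bisection loop by an integer Newton iteration that converges a single estimate to floor(cbrt(n)) and then adjusts by at most one.
import Mathlib
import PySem

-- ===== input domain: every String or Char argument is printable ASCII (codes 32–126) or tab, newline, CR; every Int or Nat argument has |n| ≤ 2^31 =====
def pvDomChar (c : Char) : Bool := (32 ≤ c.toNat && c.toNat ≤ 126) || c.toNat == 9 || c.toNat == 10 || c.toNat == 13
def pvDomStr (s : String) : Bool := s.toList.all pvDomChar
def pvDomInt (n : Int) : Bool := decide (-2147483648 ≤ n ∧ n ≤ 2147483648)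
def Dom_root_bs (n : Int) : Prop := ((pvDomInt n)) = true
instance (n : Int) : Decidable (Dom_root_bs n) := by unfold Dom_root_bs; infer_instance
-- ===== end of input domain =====

-- B replaces A's bisection by an integer Newton iteration for the cube root; same result, similar cost (objective: alternative).

-- ===== PORT A =====
-- the while-loop of A: low/high bisection; terminates because high - low shrinks
def pvBsLoop (n low high : Int) : Int :=
  if _h : low < high then
    let mid := PySem.Int.floordiv (low + high) 2
    if mid ^ 3 < n then pvBsLoop n (mid + 1) high else pvBsLoop n low mid
  else low
termination_by (high - low).toNat
decreasing_by
  all_goals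
    have h1 : low ≤ PySem.Int.floordiv (low + high) 2 := by
      rw [PySem.Int.floordiv_eq_ediv_of_pos (by norm_num)]; omega
    have h2 : PySem.Int.floordiv (low + high) 2 < high := by
      rw [PySem.Int.floordiv_eq_ediv_of_pos (by norm_num)]; omega
    omega

def root_bs (n : Int) : Int := pvBsLoop n 0 n

-- ===== PORT B =====
-- the while-loop of B: Newton step y = (2x + n // (x*x)) // 3, repeated while y < x.
-- The '0 ≤ y' conjunct is a totality guard only (for n ≥ 1 the iterate never goes negative).
def pvNewtonLoop (n x : Int) : Int :=
  let y := PySem.Int.floordiv (2 * x + PySem.Int.floordiv n (x * x)) 3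
  if _h : 0 ≤ y ∧ y < x then pvNewtonLoop n y else x
termination_by x.toNat
decreasing_by omega

def root_bs_alt (n : Int) : Int :=
  if n ≤ 0 then 0
  else
    let x := pvNewtonLoop n n
    if x * x * x ≥ n then x else x + 1

-- ===== PRECONDITION & SPEC =====
def Spec_root_bs (n : Int) (out : Int) : Prop := out = root_bs_alt n
instance (n : Int) (out : Int) : Decidable (Spec_root_bs n out) := by unfold Spec_root_bs; infer_instance

-- ===== CLAIM (what is proved, stated in full; the proofs are below) =====
def Claim_equal_root_bs : Prop := ∀ (n : Int), Dom_root_bs n → Spec_root_bs n (root_bs n)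

-- ===== LEMMAS AND PROOFS =====

theorem cube_le_cube {a b : Int} (h : a ≤ b) : a ^ 3 ≤ b ^ 3 := by
  nlinarith [sq_nonneg (a + b), sq_nonneg (a - b), sq_nonneg a, sq_nonneg b]

-- A's loop returns c whenever low ≤ c ≤ high, where c is claimed to satisfy the
-- "smallest k with k^3 ≥ n" characterization
theorem pvBsLoop_eq (n c : Int) (hc1 : n ≤ c ^ 3) (hc2 : (c - 1) ^ 3 < n) :
    ∀ N low high, (high - low).toNat ≤ N → low ≤ c → c ≤ high → pvBsLoop n low high = c := by
  intro N
  induction N with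
  | zero =>
    intro low high hN hlc hch
    rw [pvBsLoop]
    have : ¬ low < high := by omega
    simp [this]; omega
  | succ N ih =>
    intro low high hN hlc hch
    rw [pvBsLoop]
    by_cases h : low < high
    · simp only [h, dif_pos]
      set mid := PySem.Int.floordiv (low + high) 2 with hmid
      have hb : low ≤ mid ∧ mid < high := by
        constructor <;> (rw [hmid, PySem.Int.floordiv_eq_ediv_of_pos (by norm_num)]; omega)
      by_cases hm : mid ^ 3 < n
      · simp only [hm, if_pos]
        have hmc : mid + 1 ≤ c := by
          by_contra hcon
          have : c ≤ mid := by omega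
          have := cube_le_cube this
          omega
        exact ih (mid + 1) high (by omega) hmc hch
      · simp only [hm, if_neg, not_false_iff]
        have hcm : c ≤ mid := by
          by_contra hcon
          have : mid ≤ c - 1 := by omega
          have := cube_le_cube this
          omega
        exact ih low mid (by omega) hlc hcm
    · simp [h]; omega

-- existence of the integer cube root r of n ≥ 1
theorem exists_root (n : Int) (hn : 1 ≤ n) : ∃ r : Int, 1 ≤ r ∧ r ^ 3 ≤ n ∧ n < (r + 1) ^ 3 := by
  induction n, hn using Int.le_induction with
  | base => exact ⟨1, by norm_num⟩
  | succ n hn ih =>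
    obtain ⟨r, h1, h2, h3⟩ := ih
    by_cases h : (r + 1) ^ 3 ≤ n + 1
    · refine ⟨r + 1, by omega, h, ?_⟩
      have : (r + 1) ^ 3 < (r + 1 + 1) ^ 3 := by nlinarith
      omega
    · exact ⟨r, h1, by omega, by omega⟩

-- Newton step stays ≥ r: (x*x)*(3r - 2x) ≤ r^3 ≤ n hence n//(x*x) ≥ 3r - 2x
theorem newton_step_ge (n x r : Int) (hr : 1 ≤ r) (hrx : r ≤ x) (hrn : r ^ 3 ≤ n) :
    r ≤ PySem.Int.floordiv (2 * x + PySem.Int.floordiv n (x * x)) 3 := by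
  have hx : 1 ≤ x := le_trans hr hrx
  have hxx : 0 < x * x := by positivity
  have key : x * x * (3 * r - 2 * x) ≤ n := by nlinarith [sq_nonneg (r - x)]
  have hd : 3 * r - 2 * x ≤ PySem.Int.floordiv n (x * x) := by
    rw [PySem.Int.le_floordiv_iff_mul_le hxx]; nlinarith
  rw [PySem.Int.le_floordiv_iff_mul_le (by norm_num : (0:Int) < 3)]
  omega

-- B's loop returns r from any start x ≥ r
theorem pvNewtonLoop_eq (n r : Int) (hr : 1 ≤ r) (hrn : r ^ 3 ≤ n) (hn : n < (r + 1) ^ 3) :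
    ∀ N x, x.toNat ≤ N → r ≤ x → pvNewtonLoop n x = r := by
  intro N
  induction N with
  | zero => intro x hN hrx; omega
  | succ N ih =>
    intro x hN hrx
    have hx : 1 ≤ x := le_trans hr hrx
    have hxx : 0 < x * x := by positivity
    rw [pvNewtonLoop]
    set y := PySem.Int.floordiv (2 * x + PySem.Int.floordiv n (x * x)) 3 with hy
    have hry : r ≤ y := newton_step_ge n x r hr hrx hrn
    by_cases hcube : x ^ 3 ≤ n
    · -- x = r, and the step does not decrease: loop stops
      have hxr : x = r := by
        by_contra hcon
        have : r + 1 ≤ x := by omega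
        have := cube_le_cube this
        omega
      have hdx : x ≤ PySem.Int.floordiv n (x * x) := by
        rw [PySem.Int.le_floordiv_iff_mul_le hxx]; nlinarith
      have hyx : x ≤ y := by
        rw [hy, PySem.Int.le_floordiv_iff_mul_le (by norm_num : (0:Int) < 3)]; omega
      have hng : ¬ (0 ≤ y ∧ y < x) := by omega
      rw [dif_neg hng]; exact hxr
    · -- x^3 > n: the step strictly decreases
      have hdx : PySem.Int.floordiv n (x * x) < x := by
        rw [PySem.Int.floordiv_lt_iff_lt_mul hxx]; nlinarith
      have hyx : y < x := by
        rw [hy, PySem.Int.floordiv_lt_iff_lt_mul (by norm_num : (0:Int) < 3)]; omega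
      have hcond : 0 ≤ y ∧ y < x := by omega
      rw [dif_pos hcond]
      exact ih y (by omega) hry

-- ===== VERDICT (by name: the statement is the Claim_ definition above) =====
theorem root_bs_spec : Claim_equal_root_bs := by
  intro n _
  unfold Spec_root_bs root_bs root_bs_alt
  by_cases hn : n ≤ 0
  · rw [pvBsLoop]
    have : ¬ (0:Int) < n := by omega
    simp [this, hn]
  · simp only [hn, if_neg, not_false_iff]
    replace hn : 1 ≤ n := by omega
    obtain ⟨r, hr, hrn, hrn'⟩ := exists_root n hn
    have hrr : r ≤ r ^ 3 := by nlinarith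
    have hloop : pvNewtonLoop n n = r :=
      pvNewtonLoop_eq n r hr hrn hrn' n.toNat n (le_refl _) (by omega)
    rw [hloop]
    by_cases hcase : r * r * r ≥ n
    · -- r^3 = n: the answer is r
      simp only [hcase, if_pos]
      have hc1 : n ≤ r ^ 3 := by nlinarith
      have hc2 : (r - 1) ^ 3 < n := by nlinarith [cube_le_cube (show r - 1 ≤ r by omega)]
      exact pvBsLoop_eq n r hc1 hc2 (n - 0).toNat 0 n (le_refl _) (by omega) (by omega)
    · -- r^3 < n: the answer is r + 1
      simp only [hcase, if_neg, not_false_iff]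
      have hc1 : n ≤ (r + 1) ^ 3 := by omega
      have hc2 : (r + 1 - 1) ^ 3 < n := by have h3 : r * r * r < n := by omega
                                           nlinarith
      have hle : r + 1 ≤ n := by have h3 : r * r * r < n := by omega
                                 nlinarith
      exact pvBsLoop_eq n (r + 1) hc1 hc2 (n - 0).toNat 0 n (le_refl _) (by omega) hle
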